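-- pv_equiv track=rewrite | github.com/Sampriti2803/ML_Hackathon_Hangman | model2/1_data_exploration.py | analyze_position_frequency
-- ===== SOURCE A (Python) =====
-- from collections import Counter
--
-- def analyze_position_frequency(words, max_length=15):
--     """Analyze letter frequency at each position"""
--     position_freq = {}
--
--     for word in words:
--         if len(word) <= max_length:
--             for pos, letter in enumerate(word):
--                 if pos not in position_freq:
--                     position_freq[pos] = Counter()
--                 position_freq[pos][letter] += 1
--
--     return position_freq
-- ===== SOURCE B (Python) =====
-- from collections import Counter
--
-- def analyze_position_frequency(words, max_length=15):
--     """Analyze letter frequency at each position (position-major pass)."""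
--     qualifying = [w for w in words if len(w) <= max_length]
--     maxlen = max((len(w) for w in qualifying), default=0)
--     return {pos: Counter(w[pos] for w in qualifying if len(w) > pos)
--             for pos in range(maxlen)}
-- ===== Notes on version B (the rewrite author's own statement) =====
-- stated objective: alternative
-- what changed: B transposes the traversal: instead of A's word-outer loop incrementally updating a dict of Counters per (position, letter), B first computes the maximum qualifying word length and then builds one Counter per position with a position-outer comprehension over the qualifying words.
import Mathlib
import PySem

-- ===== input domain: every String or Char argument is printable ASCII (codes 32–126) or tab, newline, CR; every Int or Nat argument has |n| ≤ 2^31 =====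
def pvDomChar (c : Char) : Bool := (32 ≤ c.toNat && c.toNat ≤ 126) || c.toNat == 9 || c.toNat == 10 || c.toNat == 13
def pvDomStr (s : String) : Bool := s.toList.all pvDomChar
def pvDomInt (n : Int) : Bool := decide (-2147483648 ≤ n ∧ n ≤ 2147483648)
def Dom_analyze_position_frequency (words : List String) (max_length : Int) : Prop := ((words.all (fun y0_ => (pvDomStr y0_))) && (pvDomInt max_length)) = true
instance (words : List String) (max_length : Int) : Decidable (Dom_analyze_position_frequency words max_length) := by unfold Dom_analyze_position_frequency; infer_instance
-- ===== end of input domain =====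

-- B re-implements A position-major (per-position Counter over the words) instead of
-- word-major nested dict updates; same return value, alternative decomposition (no speed claim).

-- ===== PORT A =====
-- one enumerate step of A's inner loop: the membership test, Counter() creation and
-- `position_freq[pos][letter] += 1` (Counter missing key reads as 0)
def pvAStep (pf : PySem.Dict Int (PySem.Dict String Int)) (pl : Int × Char) :
    PySem.Dict Int (PySem.Dict String Int) :=
  let pf' := if pf.contains pl.1 then pf else pf.insert pl.1 PySem.Dict.empty
  pf'.insert pl.1 ((pf'.getD pl.1 PySem.Dict.empty).modify (String.ofList [pl.2]) 0 (· + 1))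

def analyze_position_frequency (words : List String) (max_length : Int) :
    List (Int × List (String × Int)) :=
  (words.foldl (fun pf w =>
      if (w.toList.length : Int) ≤ max_length then
        (PySem.List.enumerate w.toList 0).foldl pvAStep pf
      else pf) PySem.Dict.empty).items.map (fun kc => (kc.1, kc.2.items))

-- ===== PORT B =====
def analyze_position_frequency_alt (words : List String) (max_length : Int) :
    List (Int × List (String × Int)) :=
  let qualifying := words.filter (fun w => (w.toList.length : Int) ≤ max_length)
  let maxlen := (qualifying.map (fun w => w.toList.length)).foldl max 0
  -- dict comprehension over range(maxlen) with distinct keys = this map;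
  -- the index `pos` is in range thanks to the filter, so getD's default is never read
  (List.range maxlen).map (fun (pos : Nat) =>
    ((pos : Int),
      (PySem.Dict.counter ((qualifying.filter (fun w => pos < w.toList.length)).map
        (fun w => String.ofList [w.toList.getD pos ' ']))).items))

-- ===== PRECONDITION & SPEC =====
def Spec_analyze_position_frequency (words : List String) (max_length : Int) (out : List (Int × List (String × Int))) : Prop := out = analyze_position_frequency_alt words max_length
instance (words : List String) (max_length : Int) (out : List (Int × List (String × Int))) : Decidable (Spec_analyze_position_frequency words max_length out) := by unfold Spec_analyze_position_frequency; infer_instance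

-- ===== CLAIM (what is proved, stated in full; the proofs are below) =====
def Claim_equal_analyze_position_frequency : Prop := ∀ (words : List String) (max_length : Int), Dom_analyze_position_frequency words max_length → Spec_analyze_position_frequency words max_length (analyze_position_frequency words max_length)

-- ===== LEMMAS AND PROOFS =====

def pvMkR (m : Nat) (g : Nat → PySem.Dict String Int) : PySem.Dict Int (PySem.Dict String Int) :=
  PySem.Dict.mk ((List.range m).map (fun (p : Nat) => ((p : Int), g p)))

theorem pvMkR_get? (m : Nat) (g : Nat → PySem.Dict String Int) (i : Nat) :
    (pvMkR m g).get? (i : Int) = if i < m then some (g i) else none := by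
  induction m with
  | zero => simp [pvMkR, PySem.Dict.get?]
  | succ n ih =>
    have key : Option.map (fun x => x.2)
        (List.find? (fun p => p.1 == (i : Int))
          ((List.range n).map (fun (p : Nat) => ((p : Int), g p))))
        = if i < n then some (g i) else none := by
      simpa [pvMkR, PySem.Dict.get?] using ih
    simp only [pvMkR, PySem.Dict.get?, List.range_succ, List.map_append, List.map_cons,
      List.map_nil, List.find?_append]
    by_cases h : i < n
    · obtain ⟨x, hx⟩ : ∃ x, List.find? (fun p => p.1 == (i : Int))
          ((List.range n).map (fun (p : Nat) => ((p : Int), g p))) = some x := by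
        cases hf : List.find? (fun p => p.1 == (i : Int))
            ((List.range n).map (fun (p : Nat) => ((p : Int), g p))) with
        | none => rw [hf] at key; simp [h] at key
        | some x => exact ⟨x, rfl⟩
      rw [hx] at key ⊢
      simp [h] at key
      simp [Option.or, key]
      omega
    · have hf : List.find? (fun p => p.1 == (i : Int))
          ((List.range n).map (fun (p : Nat) => ((p : Int), g p))) = none := by
        cases hf : List.find? (fun p => p.1 == (i : Int))
            ((List.range n).map (fun (p : Nat) => ((p : Int), g p))) with
        | none => rfl
        | some x => rw [hf] at key; simp [h] at key
      rw [hf, Option.none_or]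
      by_cases he : i = n
      · subst he; simp
      · have : ¬ ((n : Int) == (i : Int)) = true := by simp; omega
        simp [List.find?, this]
        omega

theorem pvMkR_contains (m : Nat) (g : Nat → PySem.Dict String Int) (i : Nat) :
    (pvMkR m g).contains (i : Int) = decide (i < m) := by
  simp [pvMkR, PySem.Dict.contains, List.any_map, Function.comp_def]
  rw [Bool.eq_iff_iff]
  simp

theorem pvMkR_getD (m : Nat) (g : Nat → PySem.Dict String Int) (i : Nat) :
    (pvMkR m g).getD (i : Int) PySem.Dict.empty = if i < m then g i else PySem.Dict.empty := by
  rw [PySem.Dict.getD, pvMkR_get?]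
  split_ifs <;> rfl

theorem pvMkR_insert_lt (m : Nat) (g : Nat → PySem.Dict String Int) (i : Nat) (h : i < m)
    (v : PySem.Dict String Int) :
    (pvMkR m g).insert (i : Int) v = pvMkR m (fun p => if p = i then v else g p) := by
  rw [PySem.Dict.insert, if_pos (by rw [pvMkR_contains]; simpa using h)]
  unfold pvMkR
  congr 1
  rw [List.map_map]
  apply List.map_congr_left
  intro p hp
  by_cases hpi : p = i
  · subst hpi; simp
  · simp [hpi]

theorem pvMkR_insert_end (m : Nat) (g : Nat → PySem.Dict String Int)
    (v : PySem.Dict String Int) :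
    (pvMkR m g).insert (m : Int) v = pvMkR (m + 1) (fun p => if p = m then v else g p) := by
  rw [PySem.Dict.insert, if_neg (by rw [pvMkR_contains]; simp)]
  unfold pvMkR
  congr 1
  rw [List.range_succ, List.map_append]
  congr 1
  · apply List.map_congr_left
    intro p hp
    simp at hp
    simp [show p ≠ m by omega]
  · simp

theorem pvMkR_congr {m m' : Nat} (g g' : Nat → PySem.Dict String Int) (hm : m = m')
    (hg : ∀ p, p < m → g p = g' p) : pvMkR m g = pvMkR m' g' := by
  subst hm
  unfold pvMkR
  congr 1
  apply List.map_congr_left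
  intro p hp
  rw [hg p (List.mem_range.mp hp)]

theorem pvStep (m i : Nat) (g : Nat → PySem.Dict String Int) (h : i ≤ m) (c : Char) :
    pvAStep (pvMkR m g) ((i : Int), c)
      = pvMkR (max m (i + 1)) (fun p => if p = i then
          ((if p < m then g p else PySem.Dict.empty).modify (String.ofList [c]) 0 (· + 1))
        else g p) := by
  unfold pvAStep
  by_cases hi : i < m
  · simp only [pvMkR_contains, hi, decide_true, if_true]
    rw [pvMkR_getD, if_pos hi, pvMkR_insert_lt m g i hi]
    apply pvMkR_congr _ _ (by omega)
    intro p hp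
    by_cases hpi : p = i <;> simp [hpi, hi]
  · have he : i = m := by omega
    subst he
    simp only [pvMkR_contains, decide_eq_true_eq]
    rw [if_neg (by omega), pvMkR_insert_end, pvMkR_getD, if_pos (by omega),
      pvMkR_insert_lt (i + 1) _ i (by omega)]
    apply pvMkR_congr _ _ (by omega)
    intro p hp
    by_cases hpi : p = i <;> simp [hpi]

theorem pvInner (cs : List Char) : ∀ (i m : Nat) (g : Nat → PySem.Dict String Int), i ≤ m →
    (PySem.List.enumerate cs (i : Int)).foldl pvAStep (pvMkR m g)
      = pvMkR (max m (i + cs.length)) (fun p =>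
          if i ≤ p ∧ p < i + cs.length then
            ((if p < m then g p else PySem.Dict.empty).modify
              (String.ofList [cs.getD (p - i) ' ']) 0 (· + 1))
          else g p) := by
  induction cs with
  | nil =>
    intro i m g h
    simp only [PySem.List.enumerate_nil, List.foldl_nil, List.length_nil]
    apply pvMkR_congr _ _ (by omega)
    intro p hp
    rw [if_neg (by omega)]
  | cons c cs ih =>
    intro i m g h
    rw [PySem.List.enumerate_cons, List.foldl_cons, pvStep m i g h c,
      show (i : Int) + 1 = ((i + 1 : Nat) : Int) by push_cast; ring,
      ih (i + 1) (max m (i + 1)) _ (by omega)]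
    apply pvMkR_congr _ _ (by simp only [List.length_cons]; omega)
    intro p hp
    simp only [List.length_cons]
    by_cases hpi : p = i
    · subst hpi
      rw [if_neg (by omega), if_pos rfl,
        if_pos (show p ≤ p ∧ p < p + (cs.length + 1) from ⟨le_rfl, by omega⟩)]
      simp
    · simp only [if_neg hpi]
      have hmx : (if p < max m (i + 1) then g p else PySem.Dict.empty)
          = (if p < m then g p else PySem.Dict.empty) := by
        by_cases hpm : p < m
        · rw [if_pos (by omega), if_pos hpm]
        · rw [if_neg (by omega), if_neg hpm]
      rw [hmx]
      by_cases hin : i + 1 ≤ p ∧ p < i + 1 + cs.length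
      · rw [if_pos hin, if_pos (show i ≤ p ∧ p < i + (cs.length + 1) from by omega),
          show p - i = (p - (i + 1)) + 1 by omega, List.getD_cons_succ]
      · rw [if_neg hin, if_neg (show ¬ (i ≤ p ∧ p < i + (cs.length + 1)) from by omega)]

def pvQual (max_length : Int) (words : List String) : List String :=
  words.filter (fun w => (w.toList.length : Int) ≤ max_length)

def pvMaxlen (max_length : Int) (words : List String) : Nat :=
  ((pvQual max_length words).map (fun w => w.toList.length)).foldl max 0

def pvLetters (max_length : Int) (words : List String) (p : Nat) : List String :=
  ((pvQual max_length words).filter (fun w => p < w.toList.length)).map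
    (fun w => String.ofList [w.toList.getD p ' '])

theorem pvLetters_nil_of_ge (max_length : Int) (words : List String) (p : Nat)
    (h : pvMaxlen max_length words ≤ p) : pvLetters max_length words p = [] := by
  unfold pvLetters
  rw [List.filter_eq_nil_iff.mpr, List.map_nil]
  intro w hw
  have hle := (PySem.List.le_foldl_max
    ((pvQual max_length words).map (fun w => w.toList.length)) 0).2
    (w.toList.length) (List.mem_map_of_mem hw)
  simp only [decide_eq_true_eq]
  unfold pvMaxlen at h
  omega

theorem pvOuter (words : List String) (max_length : Int) :
    words.foldl (fun pf w =>
      if (w.toList.length : Int) ≤ max_length then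
        (PySem.List.enumerate w.toList 0).foldl pvAStep pf
      else pf) PySem.Dict.empty
      = pvMkR (pvMaxlen max_length words)
          (fun p => PySem.Dict.counter (pvLetters max_length words p)) := by
  induction words using List.reverseRecOn with
  | nil => rfl
  | append_singleton ws w ih =>
    rw [List.foldl_append, List.foldl_cons, List.foldl_nil, ih]
    by_cases hq : (w.toList.length : Int) ≤ max_length
    · rw [if_pos hq,
        show (0 : Int) = ((0 : Nat) : Int) by norm_num,
        pvInner w.toList 0 (pvMaxlen max_length ws) _ (Nat.zero_le _)]
      have hqual : pvQual max_length (ws ++ [w]) = pvQual max_length ws ++ [w] := by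
        rw [pvQual, List.filter_append, ← pvQual]
        congr 1
        simp
        simpa using hq
      have hml : pvMaxlen max_length (ws ++ [w])
          = max (pvMaxlen max_length ws) w.toList.length := by
        rw [pvMaxlen, hqual, List.map_append, List.foldl_append, ← pvMaxlen]
        simp
      apply pvMkR_congr
      · rw [hml]; omega
      · intro p hp
        have hlet : pvLetters max_length (ws ++ [w]) p
            = pvLetters max_length ws p
              ++ (if p < w.toList.length then [String.ofList [w.toList.getD p ' ']] else []) := by
        
          rw [pvLetters, hqual, List.filter_append, List.map_append, ← pvLetters]
          congr 1
          by_cases hpw : p < w.toList.length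
          · rw [if_pos hpw, List.filter_cons, if_pos (by simpa using hpw), List.filter_nil]
            simp
          · rw [if_neg hpw, List.filter_cons, if_neg (by simpa using hpw), List.filter_nil]
            simp
        by_cases hpw : p < w.toList.length
        · rw [if_pos (by omega : 0 ≤ p ∧ p < 0 + w.toList.length)]
          rw [hlet, if_pos hpw, PySem.Dict.counter_append_singleton, Nat.sub_zero]
          by_cases hpm : p < pvMaxlen max_length ws
          · rw [if_pos hpm]
          · rw [if_neg hpm, pvLetters_nil_of_ge max_length ws p (by omega)]
            rfl
        · rw [if_neg (by omega : ¬ (0 ≤ p ∧ p < 0 + w.toList.length))]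
          rw [hlet, if_neg hpw, List.append_nil]
    · rw [if_neg hq]
      have hqual : pvQual max_length (ws ++ [w]) = pvQual max_length ws := by
        rw [pvQual, List.filter_append, ← pvQual]
        simp
        simp at hq
        omega
      apply pvMkR_congr
      · simp only [pvMaxlen, hqual]
      · intro p hp
        simp only [pvLetters, hqual]

-- ===== VERDICT (by name: the statement is the Claim_ definition above) =====
theorem analyze_position_frequency_spec : Claim_equal_analyze_position_frequency := by
  intro words max_length _
  unfold Spec_analyze_position_frequency analyze_position_frequency analyze_position_frequency_alt
  rw [pvOuter]
  simp [pvMkR, pvMaxlen, pvLetters, pvQual, List.map_map, Function.comp_def]
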